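-- pv_equiv track=rewrite | github.com/mtakeshi1/pythonexperiments | leetcode/p2306.py | distinctNames4
-- ===== SOURCE A (Python) =====
-- from typing import List
--
-- def distinctNames4(ideas: List[str]) -> int:
--     c = 0
--     initials = list(set([c[0] for c in ideas]))
--     groups = dict()
--     for word in ideas:
--         groups.setdefault(word[0], set()).add(word[1:])
--
--     for letter0 in initials:
--         for letter1 in initials:
--             if letter0 != letter1:
--                 # common = len(groups[letter0] & groups[letter1])
--                 c += len(groups[letter0] - groups[letter1]) * (len(groups[letter1] - groups[letter0]))
--     return c
-- ===== SOURCE B (Python) =====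
-- from typing import List
--
-- def _pairs(gs):
--     # sum over unordered pairs of groups: 2 * |g \ h| * |h \ g|, computed
--     # from one intersection size per pair
--     if not gs:
--         return 0
--     g, rest = gs[0], gs[1:]
--     s = 0
--     for h in rest:
--         common = len(g & h)
--         s += 2 * (len(g) - common) * (len(h) - common)
--     return s + _pairs(rest)
--
-- def distinctNames4(ideas: List[str]) -> int:
--     groups = {}
--     for word in ideas:
--         groups.setdefault(word[0], set()).add(word[1:])
--     return _pairs(list(groups.values()))
-- ===== Notes on version B (the rewrite author's own statement) =====
-- stated objective: simpler
-- what changed: B replaces A's ordered double loop over initials with per-orientation set differences by a recursion over unordered pairs of suffix groups that computes one intersection size per pair and adds 2*(|g|-common)*(|h|-common).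
import Mathlib
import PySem

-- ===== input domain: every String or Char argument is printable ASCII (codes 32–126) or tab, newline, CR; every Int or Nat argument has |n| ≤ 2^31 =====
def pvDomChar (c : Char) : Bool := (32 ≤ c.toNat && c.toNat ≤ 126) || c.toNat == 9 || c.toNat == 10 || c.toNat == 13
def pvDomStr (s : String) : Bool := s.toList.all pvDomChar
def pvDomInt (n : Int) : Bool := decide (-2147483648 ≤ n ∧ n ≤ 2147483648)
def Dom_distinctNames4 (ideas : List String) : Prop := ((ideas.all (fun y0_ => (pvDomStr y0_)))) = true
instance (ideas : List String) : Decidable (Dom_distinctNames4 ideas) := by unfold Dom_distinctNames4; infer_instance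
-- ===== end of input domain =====

-- B replaces A's ordered double loop over initials (a set-difference product per ordered
-- pair) by a recursion over unordered pairs of groups computing one intersection size per
-- pair and adding 2*(|g|-common)*(|h|-common); objective: simpler.

-- ===== PORT A =====
-- word[0] as a Char (Pre_ excludes the empty string, so the default is never read)
def pvKey (w : String) : Char := w.toList.headD ' '
-- word[1:] as a List Char
def pvSuffix (w : String) : List Char := w.toList.tail
-- groups.setdefault(word[0], set()).add(word[1:])  — shared by both Pythons verbatim
def pvGroups (ideas : List String) : PySem.Dict Char (PySem.Set (List Char)) :=
  ideas.foldl
    (fun d w => d.modify (pvKey w) PySem.Set.empty (fun s => PySem.Set.add s (pvSuffix w)))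
    PySem.Dict.empty

def distinctNames4 (ideas : List String) : Int :=
  let initials : List Char := PySem.Set.ofList (ideas.map pvKey)
  let groups := pvGroups ideas
  initials.foldl (fun c letter0 =>
    initials.foldl (fun c letter1 =>
      if letter0 ≠ letter1 then
        c + PySem.Set.len (PySem.Set.diff (groups.getD letter0 PySem.Set.empty)
                                          (groups.getD letter1 PySem.Set.empty))
          * PySem.Set.len (PySem.Set.diff (groups.getD letter1 PySem.Set.empty)
                                          (groups.getD letter0 PySem.Set.empty))
      else c) c) 0

-- ===== PORT B =====
-- _pairs(gs): recursion over unordered pairs; one intersection size per pair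
def pvPairs : List (PySem.Set (List Char)) → Int
  | [] => 0
  | g :: rest =>
    (rest.foldl (fun s h =>
        s + 2 * (PySem.Set.len g - PySem.Set.len (PySem.Set.inter g h))
              * (PySem.Set.len h - PySem.Set.len (PySem.Set.inter g h))) 0)
    + pvPairs rest

def distinctNames4_alt (ideas : List String) : Int :=
  pvPairs (pvGroups ideas).values

-- ===== PRECONDITION & SPEC =====
-- Pre_ excludes lists containing the empty string, on which A raises IndexError at word[0].
def Pre_distinctNames4 (ideas : List String) : Prop := ∀ w ∈ ideas, w ≠ ""
instance (ideas : List String) : Decidable (Pre_distinctNames4 ideas) := by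
  unfold Pre_distinctNames4; infer_instance
def pvWitness_distinctNames4 : List String := ["ab", "ba", "aa"]

def Spec_distinctNames4 (ideas : List String) (out : Int) : Prop := out = distinctNames4_alt ideas
instance (ideas : List String) (out : Int) : Decidable (Spec_distinctNames4 ideas out) := by
  unfold Spec_distinctNames4; infer_instance

-- ===== CLAIM (what is proved, stated in full; the proofs are below) =====
def Claim_equal_distinctNames4 : Prop := ∀ (ideas : List String), Dom_distinctNames4 ideas → Pre_distinctNames4 ideas → Spec_distinctNames4 ideas (distinctNames4 ideas)

-- ===== LEMMAS AND PROOFS =====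

lemma pvGroups_getD_nodup_aux (l : List String) :
    ∀ (d : PySem.Dict Char (PySem.Set (List Char))),
      (∀ k, (d.getD k PySem.Set.empty).Nodup) →
      ∀ k, ((l.foldl
        (fun d w => d.modify (pvKey w) PySem.Set.empty (fun s => PySem.Set.add s (pvSuffix w)))
        d).getD k PySem.Set.empty).Nodup := by
  induction l with
  | nil => intro d hd k; simpa using hd k
  | cons w l ih =>
    intro d hd k
    simp only [List.foldl_cons]
    refine ih _ ?_ k
    intro k'
    rw [PySem.Dict.getD_modify]
    split_ifs with h
    · exact PySem.Set.nodup_add _ _ (hd _)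
    · exact hd k'

lemma pvGroups_getD_nodup (ideas : List String) (k : Char) :
    ((pvGroups ideas).getD k PySem.Set.empty).Nodup := by
  refine pvGroups_getD_nodup_aux ideas _ ?_ k
  intro k'
  simp [PySem.Dict.getD_empty, PySem.Set.empty]

-- |X \ Y| = |X| - |X ∩ Y|  (filter partition)
lemma pvLenDiff (X Y : PySem.Set (List Char)) :
    PySem.Set.len (PySem.Set.diff X Y)
      = PySem.Set.len X - PySem.Set.len (PySem.Set.inter X Y) := by
  simp only [PySem.Set.len, PySem.Set.diff, PySem.Set.inter]
  have h : (List.filter (fun x => !PySem.Set.contains Y x) X).length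
      + (List.filter (fun x => PySem.Set.contains Y x) X).length = X.length := by
    induction X with
    | nil => rfl
    | cons a t ih =>
      simp only [List.filter_cons]
      cases hp : PySem.Set.contains Y a <;>
        simp only [hp, Bool.not_false, Bool.not_true, Bool.false_eq_true, eq_self_iff_true,
          if_true, if_false, List.length_cons] <;>
        omega
  omega

lemma pvFilterContainsLen (A B : List (List Char)) (hA : A.Nodup) :
    (List.filter (fun x => PySem.Set.contains B x) A).length = (A.toFinset ∩ B.toFinset).card := by
  rw [← List.toFinset_card_of_nodup (hA.filter _)]
  congr 1
  ext a
  simp [PySem.Set.contains, List.mem_toFinset]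

-- |X ∩ Y| = |Y ∩ X| for genuine sets
lemma pvInterComm (X Y : PySem.Set (List Char)) (hX : X.Nodup) (hY : Y.Nodup) :
    PySem.Set.len (PySem.Set.inter X Y) = PySem.Set.len (PySem.Set.inter Y X) := by
  simp only [PySem.Set.len, PySem.Set.inter]
  rw [pvFilterContainsLen X Y hX, pvFilterContainsLen Y X hY, Finset.inter_comm]

lemma pvPairTerm (X Y : PySem.Set (List Char)) (hX : X.Nodup) (hY : Y.Nodup) :
    PySem.Set.len (PySem.Set.diff X Y) * PySem.Set.len (PySem.Set.diff Y X)
      + PySem.Set.len (PySem.Set.diff Y X) * PySem.Set.len (PySem.Set.diff X Y)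
      = 2 * (PySem.Set.len X - PySem.Set.len (PySem.Set.inter X Y))
          * (PySem.Set.len Y - PySem.Set.len (PySem.Set.inter X Y)) := by
  rw [pvLenDiff X Y, pvLenDiff Y X, pvInterComm Y X hY hX]; ring

-- the double loop over a duplicate-free list equals the unordered-pair recursion
lemma pvMain (g : Char → PySem.Set (List Char)) (hg : ∀ k, (g k).Nodup) :
    ∀ (K : List Char), K.Nodup →
    (K.map (fun x => (K.map (fun y =>
        if x ≠ y then
          PySem.Set.len (PySem.Set.diff (g x) (g y)) * PySem.Set.len (PySem.Set.diff (g y) (g x))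
        else 0)).sum)).sum
      = pvPairs (K.map g) := by
  intro K
  induction K with
  | nil => intro _; simp [pvPairs]
  | cons a K ih =>
    intro h
    obtain ⟨ha, hK⟩ := List.nodup_cons.mp h
    simp only [List.map_cons, List.sum_cons, pvPairs]
    rw [PySem.List.foldl_add, List.map_map]
    simp only [Function.comp_def]
    rw [PySem.List.sum_map_add_int]
    rw [← ih hK]
    have hdiag : (if a ≠ a then
        PySem.Set.len (PySem.Set.diff (g a) (g a)) * PySem.Set.len (PySem.Set.diff (g a) (g a))
        else 0) = 0 := by simp
    rw [hdiag]
    have hrow : (K.map (fun y =>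
        if a ≠ y then
          PySem.Set.len (PySem.Set.diff (g a) (g y)) * PySem.Set.len (PySem.Set.diff (g y) (g a))
        else 0)).sum
        + (K.map (fun x =>
        if x ≠ a then
          PySem.Set.len (PySem.Set.diff (g x) (g a)) * PySem.Set.len (PySem.Set.diff (g a) (g x))
        else 0)).sum
        = (K.map (fun y => ((2 : Int)
            * (PySem.Set.len (g a) - PySem.Set.len (PySem.Set.inter (g a) (g y)))
            * (PySem.Set.len (g y) - PySem.Set.len (PySem.Set.inter (g a) (g y)))))).sum := by
      rw [← PySem.List.sum_map_add_int]
      refine congrArg List.sum (List.map_congr_left ?_)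
      intro y hy
      have hay : a ≠ y := by rintro rfl; exact ha hy
      rw [if_pos hay, if_pos hay.symm]
      exact pvPairTerm (g a) (g y) (hg a) (hg y)
    rw [← hrow]
    ring

-- A's accumulator double loop as a double sum
lemma pvDouble (t : Char → Char → Int) (K : List Char) :
    K.foldl (fun c l0 => K.foldl (fun c l1 => if l0 ≠ l1 then c + t l0 l1 else c) c) 0
      = (K.map (fun l0 => (K.map (fun l1 => if l0 ≠ l1 then t l0 l1 else 0)).sum)).sum := by
  have h1 : ∀ (c : Int) (l0 : Char),
      List.foldl (fun c l1 => if l0 ≠ l1 then c + t l0 l1 else c) c K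
        = c + (K.map (fun l1 => if l0 ≠ l1 then t l0 l1 else 0)).sum := by
    intro c l0
    have h := PySem.List.foldl_congr_mem K
      (fun c l1 => if l0 ≠ l1 then c + t l0 l1 else c)
      (fun c l1 => c + (if l0 ≠ l1 then t l0 l1 else 0)) c
      (by intro acc x _; dsimp only; split_ifs <;> simp)
    rw [h, PySem.List.foldl_add]
  have h2 := PySem.List.foldl_congr_mem K
      (fun c l0 => List.foldl (fun c l1 => if l0 ≠ l1 then c + t l0 l1 else c) c K)
      (fun c l0 => c + (K.map (fun l1 => if l0 ≠ l1 then t l0 l1 else 0)).sum) 0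
      (by intro acc x _; exact h1 acc x)
  rw [h2, PySem.List.foldl_add, zero_add]

-- ===== VERDICT (by name: the statement is the Claim_ definition above) =====
theorem distinctNames4_spec : Claim_equal_distinctNames4 := by
  intro ideas _ _
  unfold Spec_distinctNames4
  dsimp only [distinctNames4, distinctNames4_alt]
  have hkeys : (pvGroups ideas).keys = PySem.Set.ofList (ideas.map pvKey) := by
    unfold pvGroups
    rw [PySem.Dict.keys_foldl_modify_key ideas pvKey PySem.Set.empty
        (fun _ w s => PySem.Set.add s (pvSuffix w))]
    rw [PySem.Dict.keys_empty]
    exact PySem.Set.update_nil_left _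
  have hnodK : (PySem.Set.ofList (ideas.map pvKey)).Nodup := PySem.Set.nodup_ofList _
  have hvals : (pvGroups ideas).values
      = (PySem.Set.ofList (ideas.map pvKey)).map
          (fun k => (pvGroups ideas).getD k PySem.Set.empty) := by
    rw [PySem.Dict.values_eq_map_keys _ (by rw [hkeys]; exact hnodK) PySem.Set.empty, hkeys]
  rw [hvals]
  rw [← pvMain (fun k => (pvGroups ideas).getD k PySem.Set.empty) (pvGroups_getD_nodup ideas)
      (PySem.Set.ofList (ideas.map pvKey)) hnodK]
  exact pvDouble _ _
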